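-- pv_equiv track=rewrite | github.com/RishiKumar156/python | replacetheiteminarrya.py | replacetheitem
-- ===== SOURCE A (Python) =====
-- def replacetheitem(nums1 , nums2):
--     j = 0
--     for i in range(len(nums1)):
--         if nums1[i] == 0 and j < len(nums2):
--             nums1[i] = nums2[j]
--             j += 1
--     nums1[:] = sorted(nums1)
--     return nums1
-- ===== SOURCE B (Python) =====
-- def replacetheitem(nums1, nums2):
--     zeros = nums1.count(0)
--     k = min(zeros, len(nums2))
--     merged = [x for x in nums1 if x != 0] + nums2[:k] + [0] * (zeros - k)
--     merged.sort()
--     nums1[:] = merged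
--     return nums1
-- ===== Notes on version B (the rewrite author's own statement) =====
-- stated objective: alternative
-- what changed: B drops the indexed replacement loop: it counts zeros once, builds the result multiset directly (non-zeros + a prefix of nums2 + leftover zeros) and sorts it, mutating nums1 in place like A.
import Mathlib
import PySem

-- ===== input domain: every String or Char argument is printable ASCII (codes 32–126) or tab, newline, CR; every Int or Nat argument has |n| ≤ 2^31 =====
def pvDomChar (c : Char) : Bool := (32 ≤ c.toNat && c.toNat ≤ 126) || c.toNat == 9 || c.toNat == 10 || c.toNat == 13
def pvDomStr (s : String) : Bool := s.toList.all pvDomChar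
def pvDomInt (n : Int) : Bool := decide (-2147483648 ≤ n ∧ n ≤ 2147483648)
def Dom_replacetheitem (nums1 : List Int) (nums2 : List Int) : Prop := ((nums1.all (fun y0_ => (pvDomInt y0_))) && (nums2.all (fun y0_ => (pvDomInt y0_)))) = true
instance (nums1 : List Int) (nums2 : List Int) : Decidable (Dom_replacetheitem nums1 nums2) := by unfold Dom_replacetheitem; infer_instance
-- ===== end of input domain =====

-- B replaces A's indexed zero-replacement loop by building the result multiset directly
-- (non-zeros ++ prefix of nums2 ++ leftover zeros) before sorting; return value proved equal
-- (A and B both mutate nums1 in place in Python; the equivalence here is about the return value).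

-- ===== PORT A =====
-- A's for-loop over nums1 with the cursor j into nums2, replacing each zero while j < len(nums2)
def replaceLoop (nums1 : List Int) (nums2 : List Int) (j : Nat) : List Int :=
  match nums1 with
  | [] => []
  | x :: xs =>
    if x = 0 ∧ j < nums2.length then nums2.getD j 0 :: replaceLoop xs nums2 (j + 1)
    else x :: replaceLoop xs nums2 j

def replacetheitem (nums1 : List Int) (nums2 : List Int) : List Int :=
  PySem.List.sorted (replaceLoop nums1 nums2 0) (fun x => x) false

-- ===== PORT B =====
def replacetheitem_alt (nums1 : List Int) (nums2 : List Int) : List Int :=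
  let zeros := nums1.count 0
  let k := min zeros nums2.length
  let merged := nums1.filter (fun x => decide (x ≠ 0)) ++ nums2.take k ++ List.replicate (zeros - k) 0
  PySem.List.sorted merged (fun x => x) false

-- ===== PRECONDITION & SPEC =====
def Spec_replacetheitem (nums1 : List Int) (nums2 : List Int) (out : List Int) : Prop := out = replacetheitem_alt nums1 nums2
instance (nums1 : List Int) (nums2 : List Int) (out : List Int) : Decidable (Spec_replacetheitem nums1 nums2 out) := by unfold Spec_replacetheitem; infer_instance

-- ===== CLAIM (what is proved, stated in full; the proofs are below) =====
def Claim_equal_replacetheitem : Prop := ∀ (nums1 : List Int) (nums2 : List Int), Dom_replacetheitem nums1 nums2 → Spec_replacetheitem nums1 nums2 (replacetheitem nums1 nums2)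

-- ===== LEMMAS AND PROOFS =====

-- A's replaced list is a permutation of B's merged list, generalized over the cursor j.
theorem replaceLoop_perm (nums2 : List Int) : ∀ (xs : List Int) (j : Nat),
    (replaceLoop xs nums2 j).Perm
      (xs.filter (fun x => decide (x ≠ 0)) ++
       ((nums2.drop j).take (min (xs.count 0) (nums2.length - j)) ++
        List.replicate (xs.count 0 - min (xs.count 0) (nums2.length - j)) 0))
  | [], j => by simp [replaceLoop]
  | x :: xs, j => by
    by_cases hx : x = 0
    · subst hx
      have hc : ((0 : Int) :: xs).count 0 = xs.count 0 + 1 := by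
        simp
      have hf : ((0 : Int) :: xs).filter (fun y => decide (y ≠ 0))
          = xs.filter (fun y => decide (y ≠ 0)) := by simp
      by_cases hj : j < nums2.length
      · have e1 : replaceLoop (0 :: xs) nums2 j
            = nums2.getD j 0 :: replaceLoop xs nums2 (j + 1) := by
          rw [replaceLoop, if_pos ⟨rfl, hj⟩]
        have hmin : min (xs.count 0 + 1) (nums2.length - j)
            = min (xs.count 0) (nums2.length - (j + 1)) + 1 := by omega
        have hrep : xs.count 0 + 1 - (min (xs.count 0) (nums2.length - (j + 1)) + 1)
            = xs.count 0 - min (xs.count 0) (nums2.length - (j + 1)) := by omega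
        have hdrop : nums2.drop j = nums2[j] :: nums2.drop (j + 1) :=
          (List.getElem_cons_drop hj).symm
        have hgetD : nums2.getD j 0 = nums2[j] := List.getD_eq_getElem _ _ hj
        rw [e1, hf, hc, hmin, hrep, hdrop, List.take_succ_cons, hgetD, List.cons_append]
        exact ((replaceLoop_perm nums2 xs (j + 1)).cons nums2[j]).trans
          List.perm_middle.symm
      · have hj0 : nums2.length - j = 0 := by omega
        have e1 : replaceLoop (0 :: xs) nums2 j = 0 :: replaceLoop xs nums2 j := by
          rw [replaceLoop, if_neg (by tauto)]
        have ih := replaceLoop_perm nums2 xs j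
        rw [hj0] at ih ⊢
        rw [e1, hf, hc]
        simp only [Nat.min_zero, List.take_zero, Nat.sub_zero, List.nil_append,
          List.replicate_succ] at ih ⊢
        exact (ih.cons 0).trans List.perm_middle.symm
    · have e1 : replaceLoop (x :: xs) nums2 j = x :: replaceLoop xs nums2 j := by
        rw [replaceLoop, if_neg (by tauto)]
      have hf : (x :: xs).filter (fun y => decide (y ≠ 0))
          = x :: xs.filter (fun y => decide (y ≠ 0)) := by simp [hx]
      have hc : (x :: xs).count 0 = xs.count 0 := by simp [hx]
      rw [e1, hf, hc, List.cons_append]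
      exact (replaceLoop_perm nums2 xs j).cons x

-- ===== VERDICT (by name: the statement is the Claim_ definition above) =====
theorem replacetheitem_spec : Claim_equal_replacetheitem := by
  intro nums1 nums2 _
  unfold Spec_replacetheitem replacetheitem replacetheitem_alt
  have h := replaceLoop_perm nums2 nums1 0
  rw [List.drop_zero, Nat.sub_zero, ← List.append_assoc] at h
  exact Iff.mpr (PySem.List.sorted_id_eq_sorted_id_iff_perm _ _) h
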